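-- pv_equiv track=rewrite | github.com/sushmag0wda/python-programming | 7strings/5reversals.py | strfilt
-- ===== SOURCE A (Python) =====
-- def strfilt(s):
--     nstr = ""
--     for i in range(len(s)):
--         if 'A' <= s[i] <= 'Z':
--             nstr = nstr + chr(ord(s[i]) + 32)
--         elif ('a' <= s[i] <= 'z') or ('0' <= s[i] <= '9'):
--             nstr = nstr + s[i]
--     return nstr
-- ===== SOURCE B (Python) =====
-- def strfilt(s):
--     # Precomputed translation table: code point -> replacement ("" for dropped chars).
--     table = {}
--     for code in range(48, 123):
--         ch = chr(code)
--         if ch.isupper():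
--             table[code] = ch.lower()
--         elif ch.isalnum():
--             table[code] = ch
--     return "".join([table.get(ord(c), "") for c in s])
-- ===== Notes on version B (the rewrite author's own statement) =====
-- stated objective: faster
-- what changed: B precomputes a code-point translation table (dict over range(48,123): uppercase code to lowered character, other alphanumeric code to itself) once, then maps the string through table lookups (missing codes map to the empty string, i.e. dropped) and joins the pieces, replacing A's per-character three-way range branching with ord/chr(+32) arithmetic on a quadratically rebuilt accumulator string.
import Mathlib
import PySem

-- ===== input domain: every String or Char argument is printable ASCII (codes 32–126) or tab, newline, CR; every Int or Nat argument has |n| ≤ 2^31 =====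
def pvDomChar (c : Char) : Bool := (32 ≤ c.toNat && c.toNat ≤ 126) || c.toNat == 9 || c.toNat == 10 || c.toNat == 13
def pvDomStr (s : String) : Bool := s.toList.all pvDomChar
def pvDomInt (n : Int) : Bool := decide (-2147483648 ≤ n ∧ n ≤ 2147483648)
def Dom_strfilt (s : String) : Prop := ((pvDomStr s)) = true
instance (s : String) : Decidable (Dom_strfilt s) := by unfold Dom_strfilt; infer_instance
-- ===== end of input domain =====

-- B replaces A's per-character range branching with ord/chr(+32) arithmetic by a
-- translation table built once (code point -> replacement string, '' = drop),
-- then a lookup-and-join pass over the string (objective: alternative).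

-- ===== PORT A =====
-- A iterates i in range(len(s)) reading s[i]: character by character, in order,
-- carrying the accumulator string nstr; ported as a foldl over the code points.
def strfilt (s : String) : String :=
  String.ofList (s.toList.foldl (fun nstr c =>
    if 'A' ≤ c ∧ c ≤ 'Z' then nstr ++ [Char.ofNat (c.toNat + 32)]
    else if ('a' ≤ c ∧ c ≤ 'z') ∨ ('0' ≤ c ∧ c ≤ '9') then nstr ++ [c]
    else nstr) [])

-- ===== PORT B =====
-- the translation table: for code in range(48,123): upper -> lowered, alnum -> itself
def strfiltTable : PySem.Dict Int String :=
  (PySem.List.pyRange 48 123 1).foldl (fun table code =>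
    let ch := Char.ofNat code.toNat
    if PySem.Chars.isupper ch then table.insert code (String.ofList [PySem.Chars.lowerChar ch])
    else if PySem.Chars.isalnum ch then table.insert code (String.ofList [ch])
    else table) PySem.Dict.empty

-- "".join([table.get(ord(c), "") for c in s])
def strfilt_alt (s : String) : String :=
  PySem.Str.join "" (s.toList.map (fun c => strfiltTable.getD (c.toNat : Int) ""))

-- ===== PRECONDITION & SPEC =====
def Spec_strfilt (s : String) (out : String) : Prop := out = strfilt_alt s
instance (s : String) (out : String) : Decidable (Spec_strfilt s out) := by unfold Spec_strfilt; infer_instance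

-- ===== CLAIM (what is proved, stated in full; the proofs are below) =====
def Claim_equal_strfilt : Prop := ∀ (s : String), Dom_strfilt s → Spec_strfilt s (strfilt s)

-- ===== LEMMAS AND PROOFS =====

-- what A's branch structure emits for one character, as a list piece
def strfiltPiece (c : Char) : List Char :=
  if 'A' ≤ c ∧ c ≤ 'Z' then [Char.ofNat (c.toNat + 32)]
  else if ('a' ≤ c ∧ c ≤ 'z') ∨ ('0' ≤ c ∧ c ≤ '9') then [c]
  else []

lemma strfilt_body_eq (nstr : List Char) (c : Char) :
    (if 'A' ≤ c ∧ c ≤ 'Z' then nstr ++ [Char.ofNat (c.toNat + 32)]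
     else if ('a' ≤ c ∧ c ≤ 'z') ∨ ('0' ≤ c ∧ c ≤ '9') then nstr ++ [c]
     else nstr) = nstr ++ strfiltPiece c := by
  unfold strfiltPiece; split_ifs <;> simp

-- the table agrees with A's branch output on every code point in the domain, by evaluation
set_option maxRecDepth 40000 in
set_option maxHeartbeats 1000000 in
lemma table_eval : ∀ n : Nat, n < 127 →
    (strfiltTable.getD ((n : Nat) : Int) "").toList = strfiltPiece (Char.ofNat n) := by
  decide

lemma table_piece (c : Char) (hc : c.toNat < 127) :
    (strfiltTable.getD ((c.toNat : Nat) : Int) "").toList = strfiltPiece c := by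
  have h := table_eval c.toNat hc
  rwa [show Char.ofNat c.toNat = c from Char.ofNat_toNat c] at h

lemma join_nil_flatten (l : List (List Char)) : PySem.Chars.join [] l = l.flatten := by
  induction l with
  | nil => simp [PySem.Chars.join_nil]
  | cons x xs ih =>
    cases xs with
    | nil => simp [PySem.Chars.join_singleton]
    | cons y ys => rw [PySem.Chars.join_cons_cons]; simp [ih]

-- ===== VERDICT (by name: the statement is the Claim_ definition above) =====
theorem strfilt_spec : Claim_equal_strfilt := by
  intro s hdom
  unfold Spec_strfilt strfilt strfilt_alt
  have hall : ∀ c ∈ s.toList, c.toNat < 127 := by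
    intro c hc
    have := List.all_eq_true.mp hdom c hc
    simp only [pvDomChar, Bool.or_eq_true, Bool.and_eq_true, decide_eq_true_eq, beq_iff_eq] at this
    omega
  apply String.ext
  simp only [strfilt_body_eq, PySem.List.foldl_append_eq_flatMap, List.nil_append,
    PySem.Str.toList_join]
  rw [show ("" : String).toList = ([] : List Char) from rfl, join_nil_flatten]
  rw [List.map_map, String.toList_ofList]
  generalize s.toList = l at hall ⊢
  induction l with
  | nil => simp
  | cons c cs ih =>
    simp only [List.flatMap_cons, List.map_cons, List.flatten_cons, Function.comp_apply]
    rw [table_piece c (hall c List.mem_cons_self), ih (fun x hx => hall x (List.mem_cons_of_mem c hx))]
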